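-- pv_equiv track=rewrite | github.com/davetremblay/base26_to_base10 | base-convert.py | base_26_to_10
-- ===== SOURCE A (Python) =====
-- def base_26_to_10(text):
--     """
--     Input: text (a to z, lower or uppercase, no space or punctuation)
--     Returns the value of the base 26 input as a base 10 integer
--     """
--     new_list = [ ord(letter)-97 for letter in text.lower() ]
--     new_list = [ x for x in new_list if x < 26 and x >= 0 ]
--     txet = new_list[::-1]
--     def multiply_by_index(data):
--         new_data = []
--         output = 0
--         for index, item in enumerate(data):
--             new_data.append(item * 26 ** index)
--             output += (item * 26 ** index)
--         return output
--     final = multiply_by_index(txet)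
--     print ("in base_26_to_10(text):",text,"gives",final)
--     return final
-- ===== SOURCE B (Python) =====
-- def base_26_to_10(text):
--     """
--     Input: text (a to z, lower or uppercase, no space or punctuation)
--     Returns the value of the base 26 input as a base 10 integer
--     """
--     final = 0
--     for ch in text.lower():
--         d = ord(ch) - 97
--         if 0 <= d < 26:
--             final = final * 26 + d
--     print ("in base_26_to_10(text):",text,"gives",final)
--     return final
-- ===== Notes on version B (the rewrite author's own statement) =====
-- stated objective: faster
-- what changed: Single left-to-right Horner pass (final = final*26 + digit, skipping non-letter chars) replaces A's build-list / filter / reverse / enumerate-with-26**index pipeline.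
import Mathlib
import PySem

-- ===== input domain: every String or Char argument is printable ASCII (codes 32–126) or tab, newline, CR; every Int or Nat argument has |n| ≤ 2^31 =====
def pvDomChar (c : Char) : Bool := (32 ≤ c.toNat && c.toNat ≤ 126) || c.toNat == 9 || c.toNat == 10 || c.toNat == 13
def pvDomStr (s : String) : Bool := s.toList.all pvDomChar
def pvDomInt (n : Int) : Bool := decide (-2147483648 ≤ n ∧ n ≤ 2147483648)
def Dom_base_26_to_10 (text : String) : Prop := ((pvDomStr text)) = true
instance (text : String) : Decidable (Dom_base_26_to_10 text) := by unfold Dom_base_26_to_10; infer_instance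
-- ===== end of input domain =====

-- B replaces A's map/filter/reverse/enumerate-with-26**index pipeline by one Horner pass; return value only (both print a trace line).
-- ===== PORT A =====
-- the 'multiply_by_index' loop: enumerate as an explicit index counter; state = (new_data, output)
def pvMulIdxGo (i : Nat) (state : List Int × Int) (data : List Int) : List Int × Int :=
  match data with
  | [] => state
  | item :: rest => pvMulIdxGo (i + 1) (state.1 ++ [item * 26 ^ i], state.2 + item * 26 ^ i) rest

def base_26_to_10 (text : String) : Int :=
  let new_list := (PySem.Str.lower text).toList.map (fun letter => ((letter.toNat : Int) - 97))
  let new_list := new_list.filter (fun x => decide (x < 26 ∧ 0 ≤ x))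
  let txet := new_list.reverse
  (pvMulIdxGo 0 ([], 0) txet).2

-- ===== PORT B =====
def base_26_to_10_alt (text : String) : Int :=
  (PySem.Str.lower text).toList.foldl
    (fun final ch =>
      let d : Int := (ch.toNat : Int) - 97
      if 0 ≤ d ∧ d < 26 then final * 26 + d else final) 0

-- ===== PRECONDITION & SPEC =====
def Spec_base_26_to_10 (text : String) (out : Int) : Prop := out = base_26_to_10_alt text
instance (text : String) (out : Int) : Decidable (Spec_base_26_to_10 text out) := by unfold Spec_base_26_to_10; infer_instance

-- ===== CLAIM (what is proved, stated in full; the proofs are below) =====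
def Claim_equal_base_26_to_10 : Prop := ∀ (text : String), Dom_base_26_to_10 text → Spec_base_26_to_10 text (base_26_to_10 text)

-- ===== LEMMAS AND PROOFS =====

-- value of the positional sum starting at power i
def pvPosVal (i : Nat) (l : List Int) : Int :=
  match l with
  | [] => 0
  | x :: r => x * 26 ^ i + pvPosVal (i + 1) r

theorem pvMulIdxGo_snd (l : List Int) : ∀ (i : Nat) (nd : List Int) (o : Int),
    (pvMulIdxGo i (nd, o) l).2 = o + pvPosVal i l := by
  induction l with
  | nil => intro i nd o; simp [pvMulIdxGo, pvPosVal]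
  | cons x r ih =>
    intro i nd o
    simp only [pvMulIdxGo, pvPosVal, ih]
    ring

theorem pvPosVal_append (l : List Int) : ∀ (i : Nat) (d : Int),
    pvPosVal i (l ++ [d]) = pvPosVal i l + d * 26 ^ (i + l.length) := by
  induction l with
  | nil => intro i d; simp [pvPosVal]
  | cons x r ih =>
    intro i d
    simp only [List.cons_append, pvPosVal, ih, List.length_cons]
    ring_nf

-- Horner fold with arbitrary accumulator splits off the accumulator
theorem pvHorner_shift (l : List Int) : ∀ (a : Int),
    l.foldl (fun f d => f * 26 + d) a = a * 26 ^ l.length + l.foldl (fun f d => f * 26 + d) 0 := by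
  induction l with
  | nil => intro a; simp
  | cons x r ih =>
    intro a
    simp only [List.foldl_cons, List.length_cons]
    rw [ih (a * 26 + x), ih (0 * 26 + x)]
    ring

-- reversed positional sum = Horner
theorem pvPosVal_reverse (l : List Int) :
    pvPosVal 0 l.reverse = l.foldl (fun f d => f * 26 + d) 0 := by
  induction l with
  | nil => simp [pvPosVal]
  | cons x r ih =>
    simp only [List.reverse_cons, List.foldl_cons]
    rw [pvPosVal_append, ih, pvHorner_shift r (0 * 26 + x)]
    simp
    ring

-- B's guarded fold over raw chars = Horner fold over A's filtered digit list
theorem pvGuard_filter (cs : List Char) : ∀ (a : Int),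
    cs.foldl (fun final ch =>
        let d : Int := (ch.toNat : Int) - 97
        if 0 ≤ d ∧ d < 26 then final * 26 + d else final) a
      = ((cs.map (fun letter => ((letter.toNat : Int) - 97))).filter
          (fun x => decide (x < 26 ∧ 0 ≤ x))).foldl (fun f d => f * 26 + d) a := by
  induction cs with
  | nil => intro a; simp
  | cons c r ih =>
    intro a
    simp only [List.foldl_cons, List.map_cons, List.filter_cons]
    by_cases h : 0 ≤ (c.toNat : Int) - 97 ∧ (c.toNat : Int) - 97 < 26
    · rw [if_pos h, if_pos (by simpa using And.intro h.2 h.1), List.foldl_cons, ih]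
    · rw [if_neg h, if_neg (by simpa using fun h2 h1 => h ⟨h1, h2⟩), ih]

-- ===== VERDICT (by name: the statement is the Claim_ definition above) =====
theorem base_26_to_10_spec : Claim_equal_base_26_to_10 := by
  intro text _
  unfold Spec_base_26_to_10 base_26_to_10 base_26_to_10_alt
  rw [pvMulIdxGo_snd, pvPosVal_reverse, pvGuard_filter]
  simp
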